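-- pv_equiv track=rewrite | github.com/nsrshkh/CodingInterview | SansaAndXOR.py | sansaXor
-- ===== SOURCE A (Python) =====
-- def sansaXor(arr):
--     arr_len = len(arr)
--     if arr_len % 2 == 0:
--         return 0
--     c = 0
--     for i in range(arr_len):
--         if i % 2 == 0:
--             c ^= arr[i]
--     return c
-- ===== SOURCE B (Python) =====
-- def sansaXor(arr):
--     # prefix-XOR accumulation: XOR together all running prefix XORs.
--     # Element arr[i] occurs in the n-i prefixes ending at j >= i, and for odd n
--     # that count is odd exactly when i is even, so the accumulated value is the
--     # XOR of the even-indexed elements -- no index-parity test is needed.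
--     if len(arr) % 2 == 0:
--         return 0
--     c = 0
--     x = 0
--     for v in arr:
--         x = x ^ v
--         c = c ^ x
--     return c
-- ===== Notes on version B (the rewrite author's own statement) =====
-- stated objective: alternative
-- what changed: replaces A's select-even-indexed scan (range loop with an i%2 test and arr[i] lookups) by accumulating the XOR of all running prefix XORs, which equals the even-indexed XOR for odd-length input because arr[i] occurs in n-i prefixes
import Mathlib
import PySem

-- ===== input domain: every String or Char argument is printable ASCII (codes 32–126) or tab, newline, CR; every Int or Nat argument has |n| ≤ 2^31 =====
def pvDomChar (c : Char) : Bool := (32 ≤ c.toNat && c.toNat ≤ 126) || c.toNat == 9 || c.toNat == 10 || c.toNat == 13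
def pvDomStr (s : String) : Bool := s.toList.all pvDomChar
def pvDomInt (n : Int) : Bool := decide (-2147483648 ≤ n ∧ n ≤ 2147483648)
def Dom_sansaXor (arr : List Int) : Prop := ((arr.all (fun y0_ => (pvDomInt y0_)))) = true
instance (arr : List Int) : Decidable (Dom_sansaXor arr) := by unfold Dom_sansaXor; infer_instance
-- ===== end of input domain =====

-- B replaces A's select-even-indexed scan (range loop, i%2 test, arr[i] lookups) by
-- accumulating the XOR of all running prefix XORs; same O(n) cost, different mechanism.

-- ===== PORT A =====
-- arr[i] is ported as pyGetD arr i 0: every index the loop produces is in range,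
-- so the default is never used and the port is exact.
def sansaXor (arr : List Int) : Int :=
  let arr_len : Int := arr.length
  if PySem.Int.mod arr_len 2 == 0 then 0
  else
    (PySem.List.pyRange 0 arr_len 1).foldl
      (fun c i => if PySem.Int.mod i 2 == 0 then PySem.Int.bxor c (PySem.List.pyGetD arr i 0) else c) 0

-- ===== PORT B =====
def sansaXor_alt (arr : List Int) : Int :=
  if PySem.Int.mod (arr.length : Int) 2 == 0 then 0
  else
    (arr.foldl (fun (st : Int × Int) v =>
      (PySem.Int.bxor st.1 (PySem.Int.bxor st.2 v), PySem.Int.bxor st.2 v)) (0, 0)).1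

-- ===== PRECONDITION & SPEC =====
def Spec_sansaXor (arr : List Int) (out : Int) : Prop := out = sansaXor_alt arr
instance (arr : List Int) (out : Int) : Decidable (Spec_sansaXor arr out) := by unfold Spec_sansaXor; infer_instance

-- ===== CLAIM =====
def Claim_equal_sansaXor : Prop := ∀ (arr : List Int), Dom_sansaXor arr → Spec_sansaXor arr (sansaXor arr)

-- ===== LEMMAS AND PROOFS =====

-- PySem.Int.bxor agrees with Mathlib's Int.xor
theorem pv_bxor_eq (a b : Int) : PySem.Int.bxor a b = Int.xor a b := by
  rcases a with m | m <;> rcases b with n | n <;>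
    simp [PySem.Int.bxor, Int.xor, Int.negSucc_eq] <;> omega

theorem pv_lxor_assoc (a b c : Int) : Int.xor (Int.xor a b) c = Int.xor a (Int.xor b c) := by
  rcases a with m | m <;> rcases b with n | n <;> rcases c with k | k <;>
    simp [Int.xor, Nat.xor_assoc]

theorem pv_bxor_assoc (a b c : Int) :
    PySem.Int.bxor (PySem.Int.bxor a b) c = PySem.Int.bxor a (PySem.Int.bxor b c) := by
  simp [pv_bxor_eq, pv_lxor_assoc]

-- (c ^ y) ^ y = c
theorem pv_cancel (c y : Int) : PySem.Int.bxor (PySem.Int.bxor c y) y = c := by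
  rw [pv_bxor_assoc, PySem.Int.bxor_self, PySem.Int.bxor_zero]

-- the parity of s+1 is the flip of the parity of s
theorem pv_mod_succ (s : Int) :
    (PySem.Int.mod (s + 1) 2 == 0) = !(PySem.Int.mod s 2 == 0) := by
  simp only [PySem.Int.mod, Int.fmod_eq_emod]
  rcases Int.emod_two_eq s with h | h
  · have h2 : (s + 1) % 2 = 1 := by omega
    simp [h, h2]
  · have h2 : (s + 1) % 2 = 0 := by omega
    simp [h, h2]

-- A's loop body folded over enumerate equals a toggling fold, for any start parity
theorem pv_main (arr : List Int) :
    ∀ (s c : Int),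
      (PySem.List.enumerate arr s).foldl
        (fun c p => if PySem.Int.mod p.1 2 == 0 then PySem.Int.bxor c p.2 else c) c
      = (arr.foldl (fun (st : Int × Bool) x =>
          (if st.2 then PySem.Int.bxor st.1 x else st.1, !st.2)) (c, PySem.Int.mod s 2 == 0)).1 := by
  induction arr with
  | nil => intro s c; simp [PySem.List.enumerate_nil]
  | cons x t ih =>
    intro s c
    rw [PySem.List.enumerate_cons]
    simp only [List.foldl_cons]
    rw [ih (s + 1) _, pv_mod_succ]

-- B's prefix-XOR fold equals the toggling fold started with flag = (length is odd):
-- the pending prefix x cancels out when the remaining length is odd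
theorem pv_shift (t : List Int) :
    ∀ (c x : Int),
      (t.foldl (fun (st : Int × Int) v =>
        (PySem.Int.bxor st.1 (PySem.Int.bxor st.2 v), PySem.Int.bxor st.2 v)) (c, x)).1
      = (t.foldl (fun (st : Int × Bool) y =>
          (if st.2 then PySem.Int.bxor st.1 y else st.1, !st.2))
          (PySem.Int.bxor c (if t.length % 2 = 1 then x else 0), decide (t.length % 2 = 1))).1 := by
  induction t with
  | nil => intro c x; simp [PySem.Int.bxor_zero]
  | cons a t ih =>
    intro c x
    simp only [List.foldl_cons]
    rw [ih]
    by_cases h : t.length % 2 = 1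
    · have h1 : ¬ (t.length + 1) % 2 = 1 := by omega
      simp [h, h1, pv_cancel]
    · have h1 : (t.length + 1) % 2 = 1 := by omega
      simp [h, h1, pv_bxor_assoc]

-- ===== VERDICT =====
theorem sansaXor_spec : Claim_equal_sansaXor := by
  intro arr _
  unfold Spec_sansaXor sansaXor sansaXor_alt
  by_cases hd : (PySem.Int.mod ((arr.length : Int)) 2 == 0) = true
  · have hz : ((arr.length : Int) % 2 = 0) := by
      simpa [PySem.Int.mod, Int.fmod_eq_emod] using hd
    simp [hz]
  · simp only [Bool.not_eq_true] at hd
    have hodd : arr.length % 2 = 1 := by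
      have h2 : ¬ ((arr.length : Int) % 2 = 0) := by
        intro h
        simp [PySem.Int.mod, Int.fmod_eq_emod, h] at hd
      omega
    have hm := pv_main arr 0 0
    rw [PySem.List.enumerate_eq_map_pyRange arr 0, List.foldl_map] at hm
    have hs := pv_shift arr 0 0
    simp only [hodd, if_pos, PySem.Int.bxor_zero, decide_true] at hs
    simp only [PySem.List.len] at hm
    have hm0 : (PySem.Int.mod 0 2 == 0) = true := by decide
    rw [hm0] at hm
    simp only [hd, Bool.false_eq_true, if_false]
    rw [hs]
    exact hm
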